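-- pv_equiv track=rewrite | github.com/bbehsaz/cyclonovo_dev | utils/spectral_convolutions_analysis.py | find_repeat_chains_longerThenx
-- ===== SOURCE A (Python) =====
-- def find_repeat_chains_longerThenx(offset_pairs, x):
--     all_xcords = [pair[0] for pair in offset_pairs]
--     all_ycords = [pair[1] for pair in offset_pairs]
--
--     def all_indices(value, qlist):
--         indices = []
--         idx = -1
--         while True:
--             try:
--                 idx = qlist.index(value, idx + 1)
--                 indices.append(idx)
--             except ValueError:
--                 break
--         return indices
--
--     def intersect(a, b):
--         """ return the intersection of two lists """
--         return list(set(a) & set(b))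
--
--     def extendChainOneStep(start_points, all_shared_values, all_xcords, all_ycords):
--         next_stepX = []
--         for ind in start_points:
--             yvalue = all_ycords[ind]
--             if yvalue in all_shared_values:
--                 next_stepX.append(yvalue)
--         return list(set(next_stepX))
--
--     original_shared_values = intersect(all_xcords, all_ycords)
--     maxchain = 2
--     last_shared_values = original_shared_values[:]
--     while maxchain < x and len(last_shared_values) > 0:
--         start_points = []
--         new_shared_values = []
--         for value in last_shared_values:
--             start_points += all_indices(value, all_xcords)
--
--         new_shared_values = extendChainOneStep(start_points, original_shared_values, all_xcords, all_ycords)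
--         last_shared_values = new_shared_values[:]
--         if len(new_shared_values) > 0:
--             maxchain += 1
--         else:
--             break
--     if maxchain == x:
--         return 1
--     else:
--         return 0
-- ===== SOURCE B (Python) =====
-- def find_repeat_chains_longerThenx(offset_pairs, x):
--     shared = {p[0] for p in offset_pairs} & {p[1] for p in offset_pairs}
--     adj = {}
--     for a, b in offset_pairs:
--         if b in shared:
--             adj.setdefault(a, set()).add(b)
--     if x == 2:
--         return 1
--     if x < 2:
--         return 0
--     frontier = shared
--     steps = x - 2
--     while steps > 0 and frontier:
--         nxt = set()
--         for v in frontier: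
--             nxt |= adj.get(v, set())
--         frontier = nxt
--         steps -= 1
--     return 1 if frontier else 0
-- ===== Notes on version B (the rewrite author's own statement) =====
-- stated objective: faster
-- what changed: Replaces the per-step rescans (repeated list.index over all x-coordinates and linear membership tests in the shared-value list) by a hash-set of shared values and a dict mapping each x-value to the set of its shared y-successors built once, so each frontier step is a union of precomputed neighbour sets.
import Mathlib
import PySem

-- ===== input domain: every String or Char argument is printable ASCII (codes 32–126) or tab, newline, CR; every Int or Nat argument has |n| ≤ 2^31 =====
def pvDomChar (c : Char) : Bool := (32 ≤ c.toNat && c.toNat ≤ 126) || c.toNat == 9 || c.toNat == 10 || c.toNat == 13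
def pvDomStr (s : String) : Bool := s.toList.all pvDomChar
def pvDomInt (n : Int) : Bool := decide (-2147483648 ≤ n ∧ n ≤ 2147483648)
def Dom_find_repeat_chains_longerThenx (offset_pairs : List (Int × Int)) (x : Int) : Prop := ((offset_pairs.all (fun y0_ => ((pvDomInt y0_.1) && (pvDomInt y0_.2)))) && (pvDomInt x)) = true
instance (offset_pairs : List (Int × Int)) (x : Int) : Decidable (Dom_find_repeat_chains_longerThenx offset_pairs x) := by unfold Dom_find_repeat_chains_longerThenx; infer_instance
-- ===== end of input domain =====

-- B builds a value->shared-successor-set adjacency dict once and steps the frontier by set unions,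
-- instead of rescanning the coordinate lists with list.index and linear membership tests each step.

-- ===== PORT A =====
-- the while/.index loop of all_indices collects exactly the ascending indices of value in qlist
def pvAllIndices (value : Int) (qlist : List Int) : List Int :=
  ((PySem.List.enumerate qlist).filter (fun p => p.2 == value)).map (·.1)

-- intersect: list(set(a) & set(b))
def pvIntersect (a b : List Int) : List Int :=
  PySem.Set.inter (PySem.Set.ofList a) (PySem.Set.ofList b)

def pvExtendChainOneStep (start_points : List Int) (all_shared_values _all_xcords all_ycords : List Int) : List Int :=
  PySem.Set.ofList (start_points.foldl
    (fun acc ind =>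
      if all_shared_values.contains (PySem.List.pyGetD all_ycords ind 0) then
        acc ++ [PySem.List.pyGetD all_ycords ind 0]
      else acc) [])

-- the while loop of A; returns the final maxchain
def pvLoopA (all_xcords all_ycords orig : List Int) (x : Int) (maxchain : Int) (last : List Int) : Int :=
  if h : maxchain < x ∧ last ≠ [] then
    let start_points := last.foldl (fun acc v => acc ++ pvAllIndices v all_xcords) []
    let new_shared := pvExtendChainOneStep start_points orig all_xcords all_ycords
    if new_shared ≠ [] then pvLoopA all_xcords all_ycords orig x (maxchain + 1) new_shared
    else maxchain
  else maxchain
termination_by (x - maxchain).toNat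
decreasing_by omega

def find_repeat_chains_longerThenx (offset_pairs : List (Int × Int)) (x : Int) : Int :=
  let all_xcords := offset_pairs.map (·.1)
  let all_ycords := offset_pairs.map (·.2)
  let orig := pvIntersect all_xcords all_ycords
  let m := pvLoopA all_xcords all_ycords orig x 2 orig
  if m == x then 1 else 0

-- ===== PORT B =====
def pvAdj (offset_pairs : List (Int × Int)) (shared : PySem.Set Int) : PySem.Dict Int (PySem.Set Int) :=
  offset_pairs.foldl
    (fun d p => if shared.contains p.2 then d.modify p.1 PySem.Set.empty (fun s => s.add p.2) else d)
    PySem.Dict.empty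

def pvStepB (adj : PySem.Dict Int (PySem.Set Int)) (frontier : PySem.Set Int) : PySem.Set Int :=
  frontier.foldl (fun acc v => acc.union (adj.getD v PySem.Set.empty)) PySem.Set.empty

def pvLoopB (adj : PySem.Dict Int (PySem.Set Int)) (steps : Int) (frontier : PySem.Set Int) : PySem.Set Int :=
  if h : 0 < steps ∧ frontier ≠ [] then pvLoopB adj (steps - 1) (pvStepB adj frontier)
  else frontier
termination_by steps.toNat
decreasing_by omega

def find_repeat_chains_longerThenx_alt (offset_pairs : List (Int × Int)) (x : Int) : Int :=
  let shared := PySem.Set.inter (PySem.Set.ofList (offset_pairs.map (·.1)))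
                               (PySem.Set.ofList (offset_pairs.map (·.2)))
  let adj := pvAdj offset_pairs shared
  if x == 2 then 1
  else if x < 2 then 0
  else if pvLoopB adj (x - 2) shared ≠ [] then 1 else 0

-- ===== PRECONDITION & SPEC =====
def Spec_find_repeat_chains_longerThenx (offset_pairs : List (Int × Int)) (x : Int) (out : Int) : Prop := out = find_repeat_chains_longerThenx_alt offset_pairs x
instance (offset_pairs : List (Int × Int)) (x : Int) (out : Int) : Decidable (Spec_find_repeat_chains_longerThenx offset_pairs x out) := by unfold Spec_find_repeat_chains_longerThenx; infer_instance

-- ===== CLAIM (what is proved, stated in full; the proofs are below) =====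
def Claim_equal_find_repeat_chains_longerThenx : Prop := ∀ (offset_pairs : List (Int × Int)) (x : Int), Dom_find_repeat_chains_longerThenx offset_pairs x → Spec_find_repeat_chains_longerThenx offset_pairs x (find_repeat_chains_longerThenx offset_pairs x)

-- ===== LEMMAS AND PROOFS =====

-- membership in one step of A, phrased over the pair list
lemma pv_memStepA (pairs : List (Int × Int)) (orig L : List Int) (a : Int) :
    a ∈ pvExtendChainOneStep (L.foldl (fun acc v => acc ++ pvAllIndices v (pairs.map (·.1))) [])
        orig (pairs.map (·.1)) (pairs.map (·.2))
      ↔ (∃ p ∈ pairs, p.1 ∈ L ∧ p.2 = a) ∧ a ∈ orig := by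
  unfold pvExtendChainOneStep pvAllIndices
  rw [PySem.List.foldl_append_eq_flatMap]
  rw [PySem.List.foldl_append_if (fun ind => orig.contains (PySem.List.pyGetD (pairs.map (·.2)) ind 0))
      (fun ind => PySem.List.pyGetD (pairs.map (·.2)) ind 0)]
  simp only [PySem.Set.mem_ofList, List.nil_append, List.mem_map, List.mem_filter,
    List.mem_flatMap, PySem.List.mem_enumerate_iff, beq_iff_eq, List.contains_iff_mem]
  have hg : ∀ (k : Nat) (h : k < pairs.length),
      PySem.List.pyGetD (pairs.map (fun x => x.2)) (0 + (k : Int)) 0 = pairs[k].2 := by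
    intro k h
    rw [zero_add, PySem.List.pyGetD_natCast]
    rw [List.getD_eq_getElem _ _ (by simpa using h)]
    simp
  constructor
  · rintro ⟨i, ⟨⟨v, hvL, q, ⟨⟨k, hk, rfl⟩, hq2⟩, hq1⟩, hmem⟩, heq⟩
    have hk' : k < pairs.length := by simpa using hk
    subst hq1
    rw [hg k hk'] at hmem heq
    refine ⟨⟨pairs[k], List.getElem_mem hk', ?_, by simpa using heq⟩, heq ▸ hmem⟩
    simp only [List.getElem_map] at hq2
    simpa [hq2] using hvL
  · rintro ⟨⟨p, hp, hpL, hp2⟩, ha⟩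
    obtain ⟨k, hk, rfl⟩ := List.mem_iff_getElem.1 hp
    refine ⟨0 + (k : Int), ⟨⟨pairs[k].1, hpL, (0 + (k : Int), pairs[k].1), ⟨⟨k, by simpa using hk, by simp⟩, by simp⟩, rfl⟩, ?_⟩, ?_⟩
    · rw [hg k hk]; simpa [hp2] using ha
    · rw [hg k hk]; simp [hp2]

-- membership in one adjacency set of B
lemma pv_memAdj (pairs : List (Int × Int)) (orig : List Int) (v a : Int) :
    a ∈ (pvAdj pairs orig).getD v PySem.Set.empty
      ↔ ∃ p ∈ pairs, p.1 = v ∧ p.2 = a ∧ a ∈ orig := by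
  have key : ∀ (ps : List (Int × Int)) (d : PySem.Dict Int (PySem.Set Int)),
      a ∈ (ps.foldl (fun d p =>
            if PySem.Set.contains orig p.2 then d.modify p.1 PySem.Set.empty (fun s => s.add p.2)
            else d) d).getD v PySem.Set.empty
        ↔ a ∈ d.getD v PySem.Set.empty ∨ ∃ p ∈ ps, p.1 = v ∧ p.2 = a ∧ a ∈ orig := by
    intro ps
    induction ps with
    | nil => simp
    | cons q ps ih =>
      intro d
      by_cases hq : q.2 ∈ orig
      · simp only [List.foldl_cons, if_pos ((PySem.Set.contains_iff orig q.2).2 hq), ih,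
          List.mem_cons]
        by_cases hv : v = q.1
        · subst hv
          rw [PySem.Dict.getD_modify_self, PySem.Set.mem_add]
          constructor
          · rintro (⟨h | rfl⟩ | ⟨p, hp, h1, h2, h3⟩)
            · exact Or.inl h
            · exact Or.inr ⟨q, Or.inl rfl, rfl, rfl, hq⟩
            · exact Or.inr ⟨p, Or.inr hp, h1, h2, h3⟩
          · rintro (h | ⟨p, rfl | hp, h1, h2, h3⟩)
            · exact Or.inl (Or.inl h)
            · exact Or.inl (Or.inr h2.symm)
            · exact Or.inr ⟨p, hp, h1, h2, h3⟩
        · rw [PySem.Dict.getD_modify_of_ne _ _ _ hv]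
          constructor
          · rintro (h | ⟨p, hp, h1, h2, h3⟩)
            · exact Or.inl h
            · exact Or.inr ⟨p, Or.inr hp, h1, h2, h3⟩
          · rintro (h | ⟨p, rfl | hp, h1, h2, h3⟩)
            · exact Or.inl h
            · exact absurd h1.symm hv
            · exact Or.inr ⟨p, hp, h1, h2, h3⟩
      · have hq' : ¬ (PySem.Set.contains orig q.2 = true) :=
          fun h => hq ((PySem.Set.contains_iff orig q.2).1 h)
        simp only [List.foldl_cons, if_neg hq', ih, List.mem_cons]
        constructor
        · rintro (h | ⟨p, hp, h1, h2, h3⟩)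
          · exact Or.inl h
          · exact Or.inr ⟨p, Or.inr hp, h1, h2, h3⟩
        · rintro (h | ⟨p, rfl | hp, h1, h2, h3⟩)
          · exact Or.inl h
          · exact absurd (h2 ▸ h3) hq
          · exact Or.inr ⟨p, hp, h1, h2, h3⟩
  unfold pvAdj
  rw [key]
  simp [PySem.Dict.getD_empty]

-- membership in one step of B
lemma pv_memStepB (adj : PySem.Dict Int (PySem.Set Int)) (L : List Int) (a : Int) :
    a ∈ pvStepB adj L ↔ ∃ v ∈ L, a ∈ adj.getD v PySem.Set.empty := by
  have key : ∀ (M : List Int) (acc : PySem.Set Int),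
      a ∈ M.foldl (fun acc v => acc.union (adj.getD v PySem.Set.empty)) acc
        ↔ a ∈ acc ∨ ∃ v ∈ M, a ∈ adj.getD v PySem.Set.empty := by
    intro M
    induction M with
    | nil => simp
    | cons w M ih =>
      intro acc
      simp only [List.foldl_cons, ih, PySem.Set.mem_union, List.mem_cons]
      constructor
      · rintro ((h | h) | ⟨v, hv, h⟩)
        exacts [Or.inl h, Or.inr ⟨w, Or.inl rfl, h⟩, Or.inr ⟨v, Or.inr hv, h⟩]
      · rintro (h | ⟨v, rfl | hv, h⟩)
        exacts [Or.inl (Or.inl h), Or.inl (Or.inr h), Or.inr ⟨v, hv, h⟩]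
  unfold pvStepB
  rw [key]
  simp

-- two lists with the same members are empty together
lemma pv_nil_iff (L L' : List Int) (h : ∀ a, a ∈ L ↔ a ∈ L') : L = [] ↔ L' = [] := by
  simp only [List.eq_nil_iff_forall_not_mem]
  constructor <;> intro hh a ha
  · exact hh a ((h a).2 ha)
  · exact hh a ((h a).1 ha)

-- the B loop keeps an empty frontier empty
lemma pv_loopB_nil (adj : PySem.Dict Int (PySem.Set Int)) (m : Int) : pvLoopB adj m [] = [] := by
  rw [pvLoopB.eq_def]
  simp

-- one step of A and one step of B produce the same set of values
lemma pv_step_equiv (pairs : List (Int × Int)) (orig L L' : List Int)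
    (hLL : ∀ a, a ∈ L ↔ a ∈ L') (a : Int) :
    a ∈ pvExtendChainOneStep (L.foldl (fun acc v => acc ++ pvAllIndices v (pairs.map (·.1))) [])
        orig (pairs.map (·.1)) (pairs.map (·.2))
      ↔ a ∈ pvStepB (pvAdj pairs orig) L' := by
  rw [pv_memStepA, pv_memStepB]
  simp only [pv_memAdj]
  constructor
  · rintro ⟨⟨p, hp, hp1, hp2⟩, ha⟩
    exact ⟨p.1, (hLL p.1).1 hp1, p, hp, rfl, hp2, ha⟩
  · rintro ⟨v, hv, p, hp, hp1, hp2, ha⟩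
    exact ⟨⟨p, hp, hp1 ▸ (hLL v).2 hv, hp2⟩, ha⟩

lemma pv_loopAB (pairs : List (Int × Int)) (orig : List Int) (x : Int) :
    ∀ (n : Nat), 1 ≤ n → ∀ (mc : Int) (L L' : List Int), mc + n = x →
      (∀ a, a ∈ L ↔ a ∈ L') →
      ((pvLoopA (pairs.map (·.1)) (pairs.map (·.2)) orig x mc L = x)
        ↔ pvLoopB (pvAdj pairs orig) (n : Int) L' ≠ []) := by
  intro n hn
  induction n, hn using Nat.le_induction with
  | base =>
    intro mc L L' hx hLL
    have hxm : mc < x := by omega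
    rw [pvLoopA.eq_def, pvLoopB.eq_def]
    by_cases hL : L = []
    · have hL' := (pv_nil_iff L L' hLL).1 hL
      rw [dif_neg (by simp [hL]), dif_neg (by simp [hL'])]
      simp [hL']
      omega
    · have hL' : L' ≠ [] := fun h => hL ((pv_nil_iff L L' hLL).2 h)
      rw [dif_pos ⟨hxm, hL⟩, dif_pos ⟨by norm_num, hL'⟩]
      dsimp only
      have hstep := pv_step_equiv pairs orig L L' hLL
      have hone : ((1 : Nat) : Int) - 1 = 0 := by norm_num
      rw [hone, pvLoopB.eq_def, dif_neg (by simp)]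
      by_cases hnew : pvExtendChainOneStep
          (L.foldl (fun acc v => acc ++ pvAllIndices v (pairs.map (·.1))) [])
          orig (pairs.map (·.1)) (pairs.map (·.2)) = []
      · have hB : pvStepB (pvAdj pairs orig) L' = [] := (pv_nil_iff _ _ hstep).1 hnew
        rw [if_neg (not_not_intro hnew)]
        simp [hB]
        omega
      · have hB : pvStepB (pvAdj pairs orig) L' ≠ [] := fun h => hnew ((pv_nil_iff _ _ hstep).2 h)
        rw [if_pos hnew]
        rw [pvLoopA.eq_def, dif_neg (by omega)]
        simp [hB]
        omega
  | succ n hn ih =>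
    intro mc L L' hx hLL
    have hxm : mc < x := by omega
    rw [pvLoopA.eq_def, pvLoopB.eq_def]
    by_cases hL : L = []
    · have hL' := (pv_nil_iff L L' hLL).1 hL
      rw [dif_neg (by simp [hL]), dif_neg (by simp [hL'])]
      simp [hL']
      omega
    · have hL' : L' ≠ [] := fun h => hL ((pv_nil_iff L L' hLL).2 h)
      rw [dif_pos ⟨hxm, hL⟩, dif_pos ⟨by exact_mod_cast Nat.succ_pos n, hL'⟩]
      dsimp only
      have hstep := pv_step_equiv pairs orig L L' hLL
      have hcast : ((n + 1 : Nat) : Int) - 1 = (n : Int) := by push_cast; ring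
      rw [hcast]
      by_cases hnew : pvExtendChainOneStep
          (L.foldl (fun acc v => acc ++ pvAllIndices v (pairs.map (·.1))) [])
          orig (pairs.map (·.1)) (pairs.map (·.2)) = []
      · have hB : pvStepB (pvAdj pairs orig) L' = [] := (pv_nil_iff _ _ hstep).1 hnew
        rw [if_neg (not_not_intro hnew), hB, pv_loopB_nil]
        simp
        omega
      · rw [if_pos hnew]
        exact ih (mc + 1) _ _ (by push_cast at hx ⊢; omega) hstep

-- ===== VERDICT (by name: the statement is the Claim_ definition above) =====
theorem find_repeat_chains_longerThenx_spec : Claim_equal_find_repeat_chains_longerThenx := by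
  intro pairs x _hdom
  unfold Spec_find_repeat_chains_longerThenx find_repeat_chains_longerThenx
    find_repeat_chains_longerThenx_alt
  dsimp only
  by_cases h2 : x = 2
  · subst h2
    rw [pvLoopA.eq_def, dif_neg (by simp)]
    norm_num
  · by_cases hlt : x < 2
    · rw [pvLoopA.eq_def, dif_neg (fun h => absurd h.1 (by omega))]
      simp [show ¬(2 : Int) = x by omega, h2, hlt]
    · have hx : 2 < x := by omega
      have h1n : 1 ≤ (x - 2).toNat := by omega
      have key := pv_loopAB pairs (pvIntersect (pairs.map (fun p => p.1)) (pairs.map (fun p => p.2)))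
        x (x - 2).toNat h1n 2
        (pvIntersect (pairs.map (fun p => p.1)) (pairs.map (fun p => p.2)))
        (pvIntersect (pairs.map (fun p => p.1)) (pairs.map (fun p => p.2)))
        (by omega) (fun a => Iff.rfl)
      rw [show (((x - 2).toNat : Int)) = x - 2 by omega] at key
      simp only [pvIntersect] at key ⊢
      rw [if_neg (show ¬((x == 2) = true) by simp [h2]), if_neg hlt]
      simp only [beq_iff_eq]
      by_cases hA : pvLoopA (pairs.map (fun p => p.1)) (pairs.map (fun p => p.2))
          (PySem.Set.inter (PySem.Set.ofList (pairs.map (fun p => p.1)))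
            (PySem.Set.ofList (pairs.map (fun p => p.2)))) x 2
          (PySem.Set.inter (PySem.Set.ofList (pairs.map (fun p => p.1)))
            (PySem.Set.ofList (pairs.map (fun p => p.2)))) = x
      · rw [if_pos hA, if_pos (key.1 hA)]
      · rw [if_neg hA, if_neg (fun h => hA (key.2 h))]
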